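-- pv_equiv track=rewrite | github.com/robly78746/SteamCompare | SteamGameCompare.py | determineProperList
-- ===== SOURCE A (Python) =====
-- def determineProperList(game):
--   gameRate = 0
--   for category in game['categories']:
--     if category["id"] == 38 or category["id"] == 9:
--       if gameRate == 0 or gameRate == 2:
--         gameRate +=1
--     elif category["id"] == 1 or category["id"] == 36:
--       if gameRate == 0 or gameRate == 1:
--         gameRate += 2
--   return gameRate
-- ===== SOURCE B (Python) =====
-- def determineProperList(game):
--   ids = [category["id"] for category in game['categories']]
--   flag1 = any(i == 38 or i == 9 for i in ids)
--   flag2 = any(i == 1 or i == 36 for i in ids)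
--   return int(flag1) + 2 * int(flag2)
-- ===== Notes on version B (the rewrite author's own statement) =====
-- stated objective: simpler
-- what changed: Replaces the order-dependent state-machine accumulator with two independent existence checks over the materialized id list, combined as flag1 + 2*flag2.
import Mathlib
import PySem

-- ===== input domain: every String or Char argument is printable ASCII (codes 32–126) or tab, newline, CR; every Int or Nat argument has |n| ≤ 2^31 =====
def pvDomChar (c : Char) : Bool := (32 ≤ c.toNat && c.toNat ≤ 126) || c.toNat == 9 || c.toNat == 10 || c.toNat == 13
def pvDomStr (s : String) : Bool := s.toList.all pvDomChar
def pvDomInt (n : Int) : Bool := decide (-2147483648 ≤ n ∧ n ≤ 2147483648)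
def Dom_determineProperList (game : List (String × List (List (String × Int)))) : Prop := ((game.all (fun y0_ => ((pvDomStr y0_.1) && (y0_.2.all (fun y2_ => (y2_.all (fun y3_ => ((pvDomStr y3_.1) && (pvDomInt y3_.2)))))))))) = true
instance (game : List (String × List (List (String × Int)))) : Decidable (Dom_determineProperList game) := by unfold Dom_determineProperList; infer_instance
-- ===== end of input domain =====

-- B replaces A's order-dependent state-machine accumulator with two independent
-- existence checks over the id list (objective: simpler). Return value only.

-- ===== PORT A =====
-- A's loop step: one category, current gameRate (missing 'id' defaults to 0, only reachable outside Pre_).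
def dplStep (gameRate : Int) (category : List (String × Int)) : Int :=
  let id := ((PySem.Dict.mk category).get? "id").getD 0
  if id == 38 || id == 9 then
    (if gameRate == 0 || gameRate == 2 then gameRate + 1 else gameRate)
  else if id == 1 || id == 36 then
    (if gameRate == 0 || gameRate == 1 then gameRate + 2 else gameRate)
  else gameRate

def determineProperList (game : List (String × List (List (String × Int)))) : Int :=
  (((PySem.Dict.mk game).get? "categories").getD []).foldl dplStep 0

-- ===== PORT B =====
def determineProperList_alt (game : List (String × List (List (String × Int)))) : Int :=
  let ids := (((PySem.Dict.mk game).get? "categories").getD []).map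
      (fun category => ((PySem.Dict.mk category).get? "id").getD 0)
  let flag1 := ids.any (fun i => i == 38 || i == 9)
  let flag2 := ids.any (fun i => i == 1 || i == 36)
  (if flag1 then 1 else 0) + 2 * (if flag2 then 1 else 0)

-- ===== PRECONDITION & SPEC =====
-- Pre_ excludes exactly the inputs where Python A raises KeyError:
-- the 'categories' key must be present and every category must have an 'id' key.
def Pre_determineProperList (game : List (String × List (List (String × Int)))) : Prop :=
  ((PySem.Dict.mk game).get? "categories").isSome = true ∧
  ∀ c ∈ ((PySem.Dict.mk game).get? "categories").getD [], ((PySem.Dict.mk c).get? "id").isSome = true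
instance (game : List (String × List (List (String × Int)))) : Decidable (Pre_determineProperList game) := by unfold Pre_determineProperList; infer_instance

def pvWitness_determineProperList : (List (String × List (List (String × Int)))) :=
  [("categories", [[("id", 38)], [("id", 1)]])]

def Spec_determineProperList (game : List (String × List (List (String × Int)))) (out : Int) : Prop := out = determineProperList_alt game
instance (game : List (String × List (List (String × Int)))) (out : Int) : Decidable (Spec_determineProperList game out) := by unfold Spec_determineProperList; infer_instance

-- ===== CLAIM (what is proved, stated in full; the proofs are below) =====
def Claim_equal_determineProperList : Prop := ∀ (game : List (String × List (List (String × Int)))), Dom_determineProperList game → Pre_determineProperList game → Spec_determineProperList game (determineProperList game)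

-- ===== LEMMAS AND PROOFS =====

-- encode the two flags as A's gameRate value
def dplEnc (f1 f2 : Bool) : Int := (if f1 then 1 else 0) + 2 * (if f2 then 1 else 0)

theorem dplStep_enc (f1 f2 : Bool) (c : List (String × Int)) :
    dplStep (dplEnc f1 f2) c =
      dplEnc (f1 || (let i := ((PySem.Dict.mk c).get? "id").getD 0; i == 38 || i == 9))
             (f2 || (let i := ((PySem.Dict.mk c).get? "id").getD 0; i == 1 || i == 36)) := by
  cases f1 <;> cases f2 <;>
    simp only [dplStep, dplEnc] <;>
    by_cases h1 : (((PySem.Dict.mk c).get? "id").getD 0 == 38 || ((PySem.Dict.mk c).get? "id").getD 0 == 9) = true <;>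
    by_cases h2 : (((PySem.Dict.mk c).get? "id").getD 0 == 1 || ((PySem.Dict.mk c).get? "id").getD 0 == 36) = true <;>
    simp_all <;> omega

theorem dplLoop (cats : List (List (String × Int))) (f1 f2 : Bool) :
    cats.foldl dplStep (dplEnc f1 f2) =
      dplEnc (f1 || cats.any (fun c => ((PySem.Dict.mk c).get? "id").getD 0 == 38 || ((PySem.Dict.mk c).get? "id").getD 0 == 9))
             (f2 || cats.any (fun c => ((PySem.Dict.mk c).get? "id").getD 0 == 1 || ((PySem.Dict.mk c).get? "id").getD 0 == 36)) := by
  induction cats generalizing f1 f2 with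
  | nil => simp [dplEnc]
  | cons c cs ih =>
      simp only [List.foldl_cons, List.any_cons]
      rw [dplStep_enc, ih]
      simp [Bool.or_assoc]

-- ===== VERDICT (by name: the statement is the Claim_ definition above) =====
theorem determineProperList_spec : Claim_equal_determineProperList := by
  intro game _ _
  show determineProperList game = determineProperList_alt game
  unfold determineProperList determineProperList_alt
  have h := dplLoop (((PySem.Dict.mk game).get? "categories").getD []) false false
  simp only [Bool.false_or, dplEnc] at h
  simp only [List.any_map]
  exact h
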